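-- pv_equiv track=rewrite | github.com/jpatrickpark/breaking_numerical_reasoning_nli | src/utilities/utils.py | return_same_num_pairs
-- ===== SOURCE A (Python) =====
-- def return_same_num_pairs(more_first=False,include_1=False, bias=0):
--     num_list = [2,3,4,5,6,7,8,9,10]
--     if include_1:
--         num_list.append(1)
--     result = []
--     for i in num_list:
--         for j in num_list:
--             if more_first:
--                 if i == j + bias:
--                     result.append((i,j))
--             else:
--                 if i + bias == j:
--                     result.append((i,j))
--     return result
-- ===== SOURCE B (Python) =====
-- def return_same_num_pairs(more_first=False, include_1=False, bias=0):
--     # closed form: partner of i is i+off; the in-range run is a contiguous interval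
--     off = -bias if more_first else bias
--     lo = max(2, 2 - off)
--     hi = min(10, 10 - off)
--     result = []
--     if include_1 and 2 <= 1 - off <= 10:
--         result.append((1 - off, 1))
--     result.extend((i, i + off) for i in range(lo, hi + 1))
--     if include_1 and (2 <= 1 + off <= 10 or off == 0):
--         result.append((1, 1 + off))
--     return result
-- ===== Notes on version B (the rewrite author's own statement) =====
-- stated objective: simpler
-- what changed: Replaces A's nested double scan over the fixed list with a closed-form construction: the matching pairs form one contiguous arithmetic run computed with max/min/range, plus at most two explicit pairs involving the optionally-appended 1.
import Mathlib
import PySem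

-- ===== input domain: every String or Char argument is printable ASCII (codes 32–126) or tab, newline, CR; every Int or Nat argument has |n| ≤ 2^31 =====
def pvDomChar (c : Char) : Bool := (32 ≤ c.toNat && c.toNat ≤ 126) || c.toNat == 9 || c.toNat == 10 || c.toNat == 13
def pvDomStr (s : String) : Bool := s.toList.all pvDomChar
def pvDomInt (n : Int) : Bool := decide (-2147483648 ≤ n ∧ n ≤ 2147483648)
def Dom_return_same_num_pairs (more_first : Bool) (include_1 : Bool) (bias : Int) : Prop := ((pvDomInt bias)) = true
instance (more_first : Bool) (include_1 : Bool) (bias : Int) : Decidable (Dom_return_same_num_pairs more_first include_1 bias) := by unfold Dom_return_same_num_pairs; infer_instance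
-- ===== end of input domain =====

-- B replaces A's nested double loop with a closed-form construction: the matching pairs form one contiguous
-- arithmetic run plus at most two explicit pairs involving 1 (objective: simpler, no scan at all).
-- ===== PORT A =====
def return_same_num_pairs (more_first : Bool) (include_1 : Bool) (bias : Int) : List (Int × Int) :=
  let num_list : List Int := [2,3,4,5,6,7,8,9,10]
  let num_list := if include_1 then num_list ++ [1] else num_list
  num_list.foldl (fun result i =>
    num_list.foldl (fun result j =>
      if more_first then
        (if i = j + bias then result ++ [(i, j)] else result)
      else
        (if i + bias = j then result ++ [(i, j)] else result)) result) []

-- ===== PORT B =====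
def return_same_num_pairs_alt (more_first : Bool) (include_1 : Bool) (bias : Int) : List (Int × Int) :=
  let off : Int := if more_first then -bias else bias
  let lo : Int := max 2 (2 - off)
  let hi : Int := min 10 (10 - off)
  let result : List (Int × Int) := []
  let result := if include_1 && (decide (2 ≤ 1 - off) && decide (1 - off ≤ 10))
                then result ++ [(1 - off, 1)] else result
  let result := result ++ (PySem.List.pyRange lo (hi + 1) 1).map (fun i => (i, i + off))
  let result := if include_1 && ((decide (2 ≤ 1 + off) && decide (1 + off ≤ 10)) || decide (off = 0))
                then result ++ [(1, 1 + off)] else result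
  result

-- ===== PRECONDITION & SPEC =====
def Spec_return_same_num_pairs (more_first : Bool) (include_1 : Bool) (bias : Int) (out : List (Int × Int)) : Prop := out = return_same_num_pairs_alt more_first include_1 bias
instance (more_first : Bool) (include_1 : Bool) (bias : Int) (out : List (Int × Int)) : Decidable (Spec_return_same_num_pairs more_first include_1 bias out) := by unfold Spec_return_same_num_pairs; infer_instance

-- ===== CLAIM =====
def Claim_equal_return_same_num_pairs : Prop := ∀ (more_first : Bool) (include_1 : Bool) (bias : Int), Dom_return_same_num_pairs more_first include_1 bias → Spec_return_same_num_pairs more_first include_1 bias (return_same_num_pairs more_first include_1 bias)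

-- ===== LEMMAS AND PROOFS =====

-- a fold whose step never changes the accumulator on elements of the list is the identity
lemma pv_foldl_fixed {α β : Type} (f : β → α → β) :
    ∀ (l : List α), (∀ r x, x ∈ l → f r x = r) → ∀ r, l.foldl f r = r := by
  intro l
  induction l with
  | nil => intro _ r; rfl
  | cons a l ih =>
      intro h r
      rw [List.foldl_cons, h r a (List.mem_cons_self)]
      exact ih (fun r x hx => h r x (List.mem_cons_of_mem _ hx)) r

-- when |bias| ≥ 10 the two values compared in A differ by at most 9, so A appends nothing
lemma pv_A_empty (more_first include_1 : Bool) (bias : Int)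
    (h : bias ≤ -10 ∨ 10 ≤ bias) :
    return_same_num_pairs more_first include_1 bias = [] := by
  unfold return_same_num_pairs
  dsimp only
  have hb : ∀ x ∈ (if include_1 then ([2,3,4,5,6,7,8,9,10] : List Int) ++ [1]
      else [2,3,4,5,6,7,8,9,10]), 1 ≤ x ∧ x ≤ 10 := by
    cases include_1 <;> · intro x hx; simp at hx; omega
  apply pv_foldl_fixed
  intro r i hi
  apply pv_foldl_fixed
  intro r' j hj
  have h1 := hb i hi
  have h2 := hb j hj
  cases more_first <;> simp only [Bool.false_eq_true, reduceIte] <;>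
    rw [if_neg (by omega)]

-- when |bias| ≥ 10 every candidate partner is out of range, so B's closed form is empty
lemma pv_B_empty (more_first include_1 : Bool) (bias : Int)
    (h : bias ≤ -10 ∨ 10 ≤ bias) :
    return_same_num_pairs_alt more_first include_1 bias = [] := by
  unfold return_same_num_pairs_alt
  cases more_first <;>
  · dsimp only [Bool.false_eq_true, reduceIte]
    rw [if_neg (by intro hc; simp at hc; omega),
        PySem.List.pyRange_one_eq_nil (by omega),
        if_neg (by intro hc; simp at hc; omega)]
    simp

-- ===== VERDICT =====
theorem return_same_num_pairs_spec : Claim_equal_return_same_num_pairs := by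
  intro more_first include_1 bias _
  unfold Spec_return_same_num_pairs
  by_cases h : -9 ≤ bias ∧ bias ≤ 9
  · obtain ⟨h1, h2⟩ := h
    cases more_first <;> cases include_1 <;> interval_cases bias <;> decide
  · have h' : bias ≤ -10 ∨ 10 ≤ bias := by omega
    rw [pv_A_empty _ _ _ h', pv_B_empty _ _ _ h']
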